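-- pv_equiv track=rewrite | github.com/AlvaroRamirez01/Analisis_de_Algoritmos_2024-1 | Practica_03/src/main.py | genera_k_zig_zag
-- ===== SOURCE A (Python) =====
-- def genera_k_zig_zag(n, k):
--     # Genera una lista de n elementos
--     lista = [_ for _ in range(1, n+1)]
--     # divide la lista en 2 sublistas de tamaño len(lista)/2
--     sublista1 = lista[:len(lista)//2]
--     # invertimos la sublista1
--     sublista1 = sublista1[::-1]
--     # divide la lista en 2 sublistas de tamaño len(lista)/2
--     sublista2 = lista[len(lista)//2:]
--     # en esta lista se guardaran los elementos generados por el zig-zag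
--     lista_k_zig_zag = []
--     # bucle que se ejecuta mientras las sublistas tengan los k elementos
--     while (len(sublista1) > k and len(sublista2) > k):
--         # tomamos los k elementos de la sublista2 y los insertamos en la lista_k_zig_zag
--         lista_k_zig_zag.extend(sublista2[:k])
--         # eliminamos los k elementos de la sublista2 ya insertados de la original
--         del sublista2[:k]
--         # tomamos los k elementos de la sublista1 y los insertamos en la lista_k_zig_zag
--         lista_k_zig_zag.extend(sublista1[:k])
--         # eliminamos los k elementos de la sublista1 ya insertados de la original
--         del sublista1[:k]
--     # terminamos de insertar los elementos de las sublistas en la lista_k_zig_zag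
--     lista_k_zig_zag.extend(sublista2)
--     lista_k_zig_zag.extend(sublista1)
--     return lista_k_zig_zag
-- ===== SOURCE B (Python) =====
-- def genera_k_zig_zag(n, k):
--     # Single pass with integer pointers over the two halves (no list copies/deletions).
--     m = n if n > 0 else 0
--     half = m // 2
--     out = []
--     i = half          # next value of the reversed first half: i, i-1, ..., 1
--     j = half + 1      # next value of the second half: j, j+1, ..., m
--     rem1 = half
--     rem2 = m - half
--     while rem1 > k and rem2 > k:
--         out.extend(range(j, j + k))
--         j += k
--         rem2 -= k
--         out.extend(range(i, i - k, -1))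
--         i -= k
--         rem1 -= k
--     out.extend(range(j, m + 1))
--     out.extend(range(i, 0, -1))
--     return out
-- ===== Notes on version B (the rewrite author's own statement) =====
-- stated objective: alternative
-- what changed: B replaces A's materialized half-lists with repeated k-prefix slicing and deletion by a single pass that emits the zig-zag blocks directly from integer pointers over the two halves, never building or mutating the half lists; intended to avoid A's repeated deletions, measured 1.79x at the largest size but not consistently above 1.5x.
import Mathlib
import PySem

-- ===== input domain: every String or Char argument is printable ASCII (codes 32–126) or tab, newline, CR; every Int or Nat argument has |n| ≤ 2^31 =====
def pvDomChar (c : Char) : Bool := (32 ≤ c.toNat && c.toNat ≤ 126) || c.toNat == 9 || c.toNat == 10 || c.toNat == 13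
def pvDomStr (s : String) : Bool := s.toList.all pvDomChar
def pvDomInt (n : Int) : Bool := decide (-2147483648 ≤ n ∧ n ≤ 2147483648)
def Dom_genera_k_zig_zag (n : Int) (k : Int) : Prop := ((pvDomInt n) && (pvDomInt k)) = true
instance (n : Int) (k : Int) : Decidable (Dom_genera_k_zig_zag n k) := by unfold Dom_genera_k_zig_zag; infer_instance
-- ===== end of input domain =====

-- B replaces A's repeated slice-copy-and-delete of the two half lists by a single pass that
-- emits each zig-zag block directly from integer pointers (objective: alternative).

-- ===== PORT A =====
-- A's while loop (fuel-guarded for totality only; under Pre_ the fuel is never exhausted)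
def pvLoopA (f : Nat) (k : Int) (sub1 sub2 acc : List Int) : List Int :=
  match f with
  | 0 => acc ++ sub2 ++ sub1
  | Nat.succ f =>
    if PySem.List.len sub1 > k ∧ PySem.List.len sub2 > k then
      pvLoopA f k (PySem.List.slice sub1 (some k) none) (PySem.List.slice sub2 (some k) none)
        (acc ++ PySem.List.slice sub2 none (some k) ++ PySem.List.slice sub1 none (some k))
    else acc ++ sub2 ++ sub1

def genera_k_zig_zag (n : Int) (k : Int) : List Int :=
  let lista := PySem.List.pyRange 1 (n + 1) 1
  let sublista1 := PySem.List.slice lista none (some (PySem.Int.floordiv (PySem.List.len lista) 2))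
  let sublista1 := (PySem.List.slice? sublista1 none none (-1)).getD []   -- sublista1[::-1]
  let sublista2 := PySem.List.slice lista (some (PySem.Int.floordiv (PySem.List.len lista) 2)) none
  pvLoopA (n.toNat + 1) k sublista1 sublista2 []

-- ===== PORT B =====
-- B's while loop over pointers (i, j) and remaining counts; returns the final pointers and output
def pvLoopB (f : Nat) (k i j rem1 rem2 : Int) (acc : List Int) : Int × Int × List Int :=
  match f with
  | 0 => (i, j, acc)
  | Nat.succ f =>
    if rem1 > k ∧ rem2 > k then
      pvLoopB f k (i - k) (j + k) (rem1 - k) (rem2 - k)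
        (acc ++ PySem.List.pyRange j (j + k) 1 ++ PySem.List.pyRange i (i - k) (-1))
    else (i, j, acc)

def genera_k_zig_zag_alt (n : Int) (k : Int) : List Int :=
  let m := if n > 0 then n else 0
  let half := PySem.Int.floordiv m 2
  let r := pvLoopB (n.toNat + 1) k half (half + 1) half (m - half) []
  r.2.2 ++ PySem.List.pyRange r.2.1 (m + 1) 1 ++ PySem.List.pyRange r.1 0 (-1)

-- ===== PRECONDITION & SPEC =====
-- Pre_ excludes k < 0, and k = 0 with n ≥ 2: there A's while loop never terminates (the slices
-- remove no elements), so A returns no value on those inputs.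
def Pre_genera_k_zig_zag (n : Int) (k : Int) : Prop := 1 ≤ k ∨ (k = 0 ∧ n ≤ 1)
instance (n : Int) (k : Int) : Decidable (Pre_genera_k_zig_zag n k) := by
  unfold Pre_genera_k_zig_zag; infer_instance

def pvWitness_genera_k_zig_zag : Int × Int := (7, 2)

def Spec_genera_k_zig_zag (n : Int) (k : Int) (out : List Int) : Prop := out = genera_k_zig_zag_alt n k
instance (n : Int) (k : Int) (out : List Int) : Decidable (Spec_genera_k_zig_zag n k out) := by
  unfold Spec_genera_k_zig_zag; infer_instance

-- ===== CLAIM (what is proved, stated in full; the proofs are below) =====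
def Claim_equal_genera_k_zig_zag : Prop := ∀ (n : Int) (k : Int), Dom_genera_k_zig_zag n k → Pre_genera_k_zig_zag n k → Spec_genera_k_zig_zag n k (genera_k_zig_zag n k)

-- ===== LEMMAS AND PROOFS =====

-- the tail B appends after its loop, as a function of the loop's result
def pvPost (m : Int) (r : Int × Int × List Int) : List Int :=
  r.2.2 ++ PySem.List.pyRange r.2.1 (m + 1) 1 ++ PySem.List.pyRange r.1 0 (-1)

lemma range_down_split (a t b : Int) (ht : 0 ≤ t) (h : b ≤ a - t) :
    PySem.List.pyRange a b (-1) =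
      PySem.List.pyRange a (a - t) (-1) ++ PySem.List.pyRange (a - t) b (-1) := by
  rw [PySem.List.pyRange_neg_one_eq_reverse, PySem.List.pyRange_neg_one_eq_reverse,
      PySem.List.pyRange_neg_one_eq_reverse, ← List.reverse_append,
      ← PySem.List.pyRange_one_append (b + 1) (a - t + 1) (a + 1) (by omega) (by omega)]

lemma loop_eq (k : Int) (hk : 0 ≤ k) : ∀ (f : Nat) (i j m : Int) (acc : List Int),
    0 ≤ i → j ≤ m + 1 →
    pvLoopA f k (PySem.List.pyRange i 0 (-1)) (PySem.List.pyRange j (m + 1) 1) acc =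
      pvPost m (pvLoopB f k i j i (m + 1 - j) acc) := by
  intro f
  induction f with
  | zero => intro i j m acc hi hj; rfl
  | succ f ih =>
    intro i j m acc hi hj
    have hlen1 : PySem.List.len (PySem.List.pyRange i 0 (-1)) = i := by
      simp [PySem.List.len, PySem.List.length_pyRange_neg_one]; omega
    have hlen2 : PySem.List.len (PySem.List.pyRange j (m + 1) 1) = m + 1 - j := by
      simp [PySem.List.len, PySem.List.length_pyRange_one]; omega
    by_cases hc : i > k ∧ m + 1 - j > k
    · have hsplit2 : PySem.List.pyRange j (m + 1) 1 =
          PySem.List.pyRange j (j + k) 1 ++ PySem.List.pyRange (j + k) (m + 1) 1 :=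
        PySem.List.pyRange_one_append j (j + k) (m + 1) (by omega) (by omega)
      have hsplit1 : PySem.List.pyRange i 0 (-1) =
          PySem.List.pyRange i (i - k) (-1) ++ PySem.List.pyRange (i - k) 0 (-1) :=
        range_down_split i k 0 hk (by omega)
      have hl2 : (PySem.List.pyRange j (j + k) 1).length = k.toNat := by
        rw [PySem.List.length_pyRange_one]; omega
      have hl1 : (PySem.List.pyRange i (i - k) (-1)).length = k.toNat := by
        rw [PySem.List.length_pyRange_neg_one]; omega
      have htake2 : PySem.List.slice (PySem.List.pyRange j (m + 1) 1) none (some k) =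
          PySem.List.pyRange j (j + k) 1 := by
        rw [PySem.List.slice_to _ hk, hsplit2, List.take_left' hl2]
      have hdrop2 : PySem.List.slice (PySem.List.pyRange j (m + 1) 1) (some k) none =
          PySem.List.pyRange (j + k) (m + 1) 1 := by
        rw [PySem.List.slice_from _ hk, hsplit2, List.drop_left' hl2]
      have htake1 : PySem.List.slice (PySem.List.pyRange i 0 (-1)) none (some k) =
          PySem.List.pyRange i (i - k) (-1) := by
        rw [PySem.List.slice_to _ hk, hsplit1, List.take_left' hl1]
      have hdrop1 : PySem.List.slice (PySem.List.pyRange i 0 (-1)) (some k) none =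
          PySem.List.pyRange (i - k) 0 (-1) := by
        rw [PySem.List.slice_from _ hk, hsplit1, List.drop_left' hl1]
      rw [pvLoopA, if_pos (by rw [hlen1, hlen2]; exact hc),
          htake1, htake2, hdrop1, hdrop2,
          pvLoopB, if_pos hc]
      have := ih (i - k) (j + k) m
        (acc ++ PySem.List.pyRange j (j + k) 1 ++ PySem.List.pyRange i (i - k) (-1))
        (by omega) (by omega)
      rw [show m + 1 - (j + k) = m + 1 - j - k from by ring] at this
      rw [this]
    · rw [pvLoopA, if_neg (by rw [hlen1, hlen2]; exact hc), pvLoopB, if_neg hc]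
      rfl

-- ===== VERDICT (by name: the statement is the Claim_ definition above) =====
theorem genera_k_zig_zag_spec : Claim_equal_genera_k_zig_zag := by
  intro n k _ hpre
  have hk : 0 ≤ k := by rcases hpre with h | ⟨h, _⟩ <;> omega
  simp only [Spec_genera_k_zig_zag, genera_k_zig_zag, genera_k_zig_zag_alt]
  have hm : (if n > 0 then n else 0) = (n.toNat : Int) := by split <;> omega
  rw [hm]
  set m : Int := (n.toNat : Int) with hm'
  have hm0 : 0 ≤ m := by positivity
  have hlista : PySem.List.pyRange 1 (n + 1) 1 = PySem.List.pyRange 1 (m + 1) 1 := by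
    rcases le_or_gt n 0 with h | h
    · rw [PySem.List.pyRange_one_eq_nil (by omega), PySem.List.pyRange_one_eq_nil (by omega)]
    · have : m = n := by omega
      rw [this]
  rw [hlista]
  have hlen : PySem.List.len (PySem.List.pyRange 1 (m + 1) 1) = m := by
    simp [PySem.List.len, PySem.List.length_pyRange_one]; omega
  rw [hlen]
  set half : Int := PySem.Int.floordiv m 2 with hhalf
  have hhb : 0 ≤ half ∧ half ≤ m := by
    rw [hhalf, PySem.Int.floordiv_eq_ediv_of_pos (by omega)]; omega
  have hsplit : PySem.List.pyRange 1 (m + 1) 1 =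
      PySem.List.pyRange 1 (1 + half) 1 ++ PySem.List.pyRange (1 + half) (m + 1) 1 :=
    PySem.List.pyRange_one_append 1 (1 + half) (m + 1) (by omega) (by omega)
  have hlh : (PySem.List.pyRange 1 (1 + half) 1).length = half.toNat := by
    rw [PySem.List.length_pyRange_one]; omega
  have hsub1 : PySem.List.slice (PySem.List.pyRange 1 (m + 1) 1) none (some half) =
      PySem.List.pyRange 1 (1 + half) 1 := by
    rw [PySem.List.slice_to _ hhb.1, hsplit, List.take_left' hlh]
  have hsub2 : PySem.List.slice (PySem.List.pyRange 1 (m + 1) 1) (some half) none =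
      PySem.List.pyRange (1 + half) (m + 1) 1 := by
    rw [PySem.List.slice_from _ hhb.1, hsplit, List.drop_left' hlh]
  rw [hsub1, hsub2, PySem.List.slice?_none_none_neg_one]
  have hrev : (PySem.List.pyRange 1 (1 + half) 1).reverse = PySem.List.pyRange half 0 (-1) := by
    rw [PySem.List.pyRange_neg_one_eq_reverse]
    norm_num
    rw [add_comm]
  simp only [Option.getD_some, hrev]
  have h1h : (1 : Int) + half = half + 1 := by omega
  rw [h1h]
  have := loop_eq k hk (n.toNat + 1) half (half + 1) m [] hhb.1 (by omega)
  rw [this]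
  have : m + 1 - (half + 1) = m - half := by omega
  rw [this]
  rfl
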